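-- pv_equiv track=rewrite | github.com/ahmrafi22/Leetcode_solves | 2246-maximum-employees-to-be-invited-to-a-meeting/maximum-employees-to-be-invited-to-a-meeting.py | calculate_mutual_chains
-- ===== SOURCE A (Python) =====
-- def calculate_mutual_chains(favorite):
--     n = len(favorite)
--     indegree = [0] * n
--     for f in favorite:
--         indegree[f] += 1
--
--     # Compute chain lengths
--     chain_length = [1] * n
--     queue = [i for i in range(n) if indegree[i] == 0]
--
--     while queue:
--         current = queue.pop()
--         next_node = favorite[current]
--         chain_length[next_node] = max(chain_length[next_node], chain_length[current] + 1)
--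
--         indegree[next_node] -= 1
--         if indegree[next_node] == 0:
--             queue.append(next_node)
--
--     # Find total chain length for mutual pairs
--     total_chain_length = 0
--     for i in range(n):
--         if i == favorite[favorite[i]]:
--             total_chain_length += chain_length[i]
--
--     return total_chain_length
-- ===== SOURCE B (Python) =====
-- def calculate_mutual_chains(favorite):
--     n = len(favorite)
--     # Any node reached after n steps of the favorite map lies on a cycle,
--     # and every cycle node is reached this way.
--     on_cycle = [False] * n
--     for s in range(n):
--         j = s
--         for _ in range(n):
--             j = favorite[j]
--         on_cycle[j] = True
--     # chain[j] = 1 + length of the longest all-non-cycle path ending just before j: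
--     # walk forward from every non-cycle start until the first cycle node.
--     chain = [1] * n
--     for s in range(n):
--         if on_cycle[s]:
--             continue
--         j = favorite[s]
--         d = 2
--         while True:
--             if chain[j] < d:
--                 chain[j] = d
--             if on_cycle[j]:
--                 break
--             j = favorite[j]
--             d += 1
--     total = 0
--     for i in range(n):
--         if i == favorite[favorite[i]]:
--             total += chain[i]
--     return total
-- ===== Notes on version B (the rewrite author's own statement) =====
-- stated objective: alternative
-- what changed: Replaces Kahn-style indegree peeling with a queue by a two-phase scheme: cycle nodes are found as the image of the n-fold favorite map, and chain lengths are computed by walking forward from every non-cycle start to the first cycle node, maximizing the travelled distance at each node.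
import Mathlib
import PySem

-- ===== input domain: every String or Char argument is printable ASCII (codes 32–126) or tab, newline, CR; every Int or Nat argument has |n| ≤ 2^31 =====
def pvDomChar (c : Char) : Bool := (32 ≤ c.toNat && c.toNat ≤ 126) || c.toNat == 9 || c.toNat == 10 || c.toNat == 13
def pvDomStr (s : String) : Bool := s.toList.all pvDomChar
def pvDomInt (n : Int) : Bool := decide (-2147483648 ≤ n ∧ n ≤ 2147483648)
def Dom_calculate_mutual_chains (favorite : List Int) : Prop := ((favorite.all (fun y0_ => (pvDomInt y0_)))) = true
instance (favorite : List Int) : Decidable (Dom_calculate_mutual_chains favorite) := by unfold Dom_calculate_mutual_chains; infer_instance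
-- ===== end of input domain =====

-- B replaces A's Kahn-style indegree peeling by cycle marking via the n-fold favorite map
-- plus forward walks from every non-cycle node (alternative decomposition, not faster).


-- ===== PORT A =====
-- `xs[i]` for a Python index i (negative = from the end); Pre_ keeps every index in range,
-- so the default is never read.
def pvAt (xs : List Int) (i : Int) : Int := PySem.List.pyGetD xs i 0
-- `xs[i] = v`; Pre_ keeps i in range.
def pvPut (xs : List Int) (i : Int) (v : Int) : List Int := PySem.List.pySetD xs i v

-- A's `while queue:` loop; Python pops/appends at the END of the list, modelled here with the
-- stack top at the HEAD.  Fuel n+1 suffices: each iteration pops one node and every node is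
-- enqueued at most once (its indegree, which only decreases, hits 0 at most once).
def pvALoop (favorite : List Int) : Nat → List Int → List Int → List Int → List Int
  | 0, _, _, chain => chain
  | _ + 1, [], _, chain => chain
  | fuel + 1, current :: queue, indeg, chain =>
    let next := pvAt favorite current
    let chain' := pvPut chain next (max (pvAt chain next) (pvAt chain current + 1))
    let indeg' := pvPut indeg next (pvAt indeg next - 1)
    if pvAt indeg' next = 0 then pvALoop favorite fuel (next :: queue) indeg' chain'
    else pvALoop favorite fuel queue indeg' chain'

def calculate_mutual_chains (favorite : List Int) : Int :=
  let n := favorite.length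
  let indegree := favorite.foldl (fun acc f => pvPut acc f (pvAt acc f + 1)) (List.replicate n (0 : Int))
  let chain0 := List.replicate n (1 : Int)
  let queue0 := (((List.range n).filter (fun i => pvAt indegree (Int.ofNat i) = 0)).map Int.ofNat).reverse
  let chain := pvALoop favorite (n + 1) queue0 indegree chain0
  (List.range n).foldl (fun acc i =>
    if (Int.ofNat i) = pvAt favorite (pvAt favorite (Int.ofNat i)) then acc + pvAt chain (Int.ofNat i)
    else acc) 0

-- ===== PORT B =====
-- B's inner `while True:` walk from a non-cycle start; stops at the first cycle node.
-- Fuel n+1 suffices: the walk is on the orbit of s and on_cycle holds n steps from s.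
def pvBWalk (favorite : List Int) (onC : List Bool) : Nat → Int → Int → List Int → List Int
  | 0, _, _, chain => chain
  | fuel + 1, j, d, chain =>
    let chain' := if pvAt chain j < d then pvPut chain j d else chain
    if PySem.List.pyGetD onC j false then chain'
    else pvBWalk favorite onC fuel (pvAt favorite j) (d + 1) chain'

def calculate_mutual_chains_alt (favorite : List Int) : Int :=
  let n := favorite.length
  let onC := (List.range n).foldl (fun acc s =>
      PySem.List.pySetD acc ((List.range n).foldl (fun j _ => pvAt favorite j) (Int.ofNat s)) true)
    (List.replicate n false)
  let chain := (List.range n).foldl (fun ch s =>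
      if PySem.List.pyGetD onC (Int.ofNat s) false then ch
      else pvBWalk favorite onC (n + 1) (pvAt favorite (Int.ofNat s)) 2 ch)
    (List.replicate n (1 : Int))
  (List.range n).foldl (fun acc i =>
    if (Int.ofNat i) = pvAt favorite (pvAt favorite (Int.ofNat i)) then acc + pvAt chain (Int.ofNat i)
    else acc) 0

-- ===== PRECONDITION & SPEC =====
-- Exactly the inputs on which the Python A returns: every entry must be a valid Python index
-- into the list itself (negative entries index from the end); anything else raises IndexError.
def Pre_calculate_mutual_chains (favorite : List Int) : Prop :=
  ∀ x ∈ favorite, -(favorite.length : Int) ≤ x ∧ x < favorite.length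
instance (favorite : List Int) : Decidable (Pre_calculate_mutual_chains favorite) := by
  unfold Pre_calculate_mutual_chains; infer_instance

def pvWitness_calculate_mutual_chains : List Int := [1, 0, 0, -3, 2]

def Spec_calculate_mutual_chains (favorite : List Int) (out : Int) : Prop :=
  out = calculate_mutual_chains_alt favorite
instance (favorite : List Int) (out : Int) : Decidable (Spec_calculate_mutual_chains favorite out) := by
  unfold Spec_calculate_mutual_chains; infer_instance

-- ===== CLAIM (what is proved, stated in full; the proofs are below) =====
def Claim_equal_calculate_mutual_chains : Prop := ∀ (favorite : List Int),
  Dom_calculate_mutual_chains favorite → Pre_calculate_mutual_chains favorite →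
    Spec_calculate_mutual_chains favorite (calculate_mutual_chains favorite)

-- ===== LEMMAS AND PROOFS =====

-- ---------- Python index bridging ----------
-- The Nat position a (valid) Python index i denotes in a list of length n.
def pvIdx (n : Nat) (i : Int) : Nat := (PySem.List.pyIdx? n i).getD 0

theorem pvIdx_lt (n : Nat) (i : Int) (hn : 0 < n) : pvIdx n i < n := by
  unfold pvIdx PySem.List.pyIdx?
  split_ifs <;> simp <;> omega

theorem pvIdx_natCast (n j : Nat) (h : j < n) : pvIdx n (j : Int) = j := by
  unfold pvIdx PySem.List.pyIdx?
  split_ifs with h1 h2 <;> simp_all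

theorem pvIdx_ofNat (n j : Nat) (h : j < n) : pvIdx n (Int.ofNat j) = j := by
  have he : (Int.ofNat j) = (j : Int) := rfl
  rw [he, pvIdx_natCast n j h]

theorem pyIdx?_eq (n : Nat) (i : Int) (h : PySem.Raise.InRange n i) :
    PySem.List.pyIdx? n i = some (pvIdx n i) := by
  obtain ⟨h1, h2⟩ := h
  unfold pvIdx PySem.List.pyIdx?
  split_ifs <;> simp_all

theorem pvAt_eq (l : List Int) (i : Int) (h : PySem.Raise.InRange l.length i) :
    pvAt l i = l.getD (pvIdx l.length i) 0 := by
  unfold pvAt PySem.List.pyGetD PySem.List.pyGet?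
  rw [pyIdx?_eq _ _ h]
  have := pvIdx_lt l.length i (by obtain ⟨h1, h2⟩ := h; omega)
  simp [List.getD, List.getElem?_eq_getElem this]

theorem pyGetD_idx {α : Type} (l : List α) (i : Int) (d : α) (h : PySem.Raise.InRange l.length i) :
    PySem.List.pyGetD l i d = l.getD (pvIdx l.length i) d := by
  unfold PySem.List.pyGetD PySem.List.pyGet?
  rw [pyIdx?_eq _ _ h]
  have := pvIdx_lt l.length i (by obtain ⟨h1, h2⟩ := h; omega)
  simp [List.getD, List.getElem?_eq_getElem this]

theorem pvPut_eq (l : List Int) (i : Int) (v : Int) (h : PySem.Raise.InRange l.length i) :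
    pvPut l i v = l.set (pvIdx l.length i) v := by
  unfold pvPut PySem.List.pySetD PySem.List.pySet?
  rw [pyIdx?_eq _ _ h]
  simp

theorem pySetD_idx {α : Type} (l : List α) (i : Int) (v : α) (h : PySem.Raise.InRange l.length i) :
    PySem.List.pySetD l i v = l.set (pvIdx l.length i) v := by
  unfold PySem.List.pySetD PySem.List.pySet?
  rw [pyIdx?_eq _ _ h]
  simp

-- ---------- generic functional-graph theory ----------
-- j lies on a cycle of f iff it is in the image of the n-fold iterate of f.
def pvOnC (n : Nat) (f : Nat → Nat) (j : Nat) : Bool :=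
  (List.range n).any (fun s => f^[n] s == j)

def pvPer (f : Nat → Nat) (j : Nat) : Prop := ∃ k, 0 < k ∧ f^[k] j = j

theorem pvOnC_iff (n : Nat) (f : Nat → Nat) (j : Nat) :
    pvOnC n f j = true ↔ ∃ s < n, f^[n] s = j := by
  unfold pvOnC
  simp [List.any_eq_true, List.mem_range]

theorem pvPer_f (f : Nat → Nat) (j : Nat) (h : pvPer f j) : pvPer f (f j) := by
  obtain ⟨k, hk, he⟩ := h
  exact ⟨k, hk, by rw [← Function.iterate_succ_apply, Function.iterate_succ_apply', he]⟩

theorem pvPer_iterate (f : Nat → Nat) (j m : Nat) (h : pvPer f j) : pvPer f (f^[m] j) := by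
  induction m with
  | zero => exact h
  | succ m ih => rw [Function.iterate_succ_apply']; exact pvPer_f _ _ ih

-- onC ↔ periodic (for a self-map of range n)
theorem pvIter_lt (n : Nat) (f : Nat → Nat) (hf : ∀ i, f i < n) (j : Nat) (hj : j < n)
    (m : Nat) : f^[m] j < n := by
  cases m with
  | zero => exact hj
  | succ m => rw [Function.iterate_succ_apply']; exact hf _

theorem pvOnC_iff_per (n : Nat) (f : Nat → Nat) (hf : ∀ i, f i < n) (j : Nat) :
    pvOnC n f j = true ↔ (j < n ∧ pvPer f j) := by
  rw [pvOnC_iff]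
  constructor
  · rintro ⟨s, hs, rfl⟩
    have hjlt : f^[n] s < n := pvIter_lt n f hf s hs n
    refine ⟨hjlt, ?_⟩
    -- pigeonhole: two equal iterates among f^[0..n] s
    obtain ⟨a, ha, b, hb, hab, he⟩ :=
      Finset.exists_ne_map_eq_of_card_lt_of_maps_to
        (s := Finset.range (n + 1)) (t := Finset.range n)
        (by simp) (fun a _ => Finset.mem_range.mpr (pvIter_lt n f hf s hs a))
    simp only [Finset.mem_range] at ha hb
    -- wlog a < b
    rcases Nat.lt_or_ge a b with hlt | hge
    · have hper : pvPer f (f^[a] s) := ⟨b - a, by omega, by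
        rw [← Function.iterate_add_apply]
        rw [show b - a + a = b by omega, he]⟩
      have : f^[n] s = f^[n - a] (f^[a] s) := by
        rw [← Function.iterate_add_apply]
        congr 1; omega
      rw [this]; exact pvPer_iterate f _ _ hper
    · have hba : b < a := by omega
      have hper : pvPer f (f^[b] s) := ⟨a - b, by omega, by
        rw [← Function.iterate_add_apply]
        rw [show a - b + b = a by omega, he]⟩
      have : f^[n] s = f^[n - b] (f^[b] s) := by
        rw [← Function.iterate_add_apply]
        congr 1; omega
      rw [this]; exact pvPer_iterate f _ _ hper
  · rintro ⟨hj, k, hk, he⟩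
    have hfix : ∀ m, f^[m * k] j = j := by
      intro m
      induction m with
      | zero => simp
      | succ m ih => rw [Nat.succ_mul, Function.iterate_add_apply, he, ih]
    refine ⟨f^[n * k - n] j, pvIter_lt n f hf j hj _, ?_⟩
    rw [← Function.iterate_add_apply]
    rw [show n + (n * k - n) = n * k by
      have : n ≤ n * k := Nat.le_mul_of_pos_right n hk
      omega]
    exact hfix n

theorem pvOnC_f (n : Nat) (f : Nat → Nat) (hf : ∀ i, f i < n) (j : Nat)
    (h : pvOnC n f j = true) : pvOnC n f (f j) = true := by
  rw [pvOnC_iff_per n f hf] at *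
  exact ⟨hf j, pvPer_f f j h.2⟩

theorem pvOnC_pred (n : Nat) (f : Nat → Nat) (hf : ∀ i, f i < n) (j : Nat)
    (h : pvOnC n f j = true) : ∃ c, c < n ∧ pvOnC n f c = true ∧ f c = j := by
  rw [pvOnC_iff_per n f hf] at h
  obtain ⟨hj, k, hk, he⟩ := h
  refine ⟨f^[k - 1] j, pvIter_lt n f hf j hj _, ?_, ?_⟩
  · rw [pvOnC_iff_per n f hf]
    exact ⟨pvIter_lt n f hf j hj _, pvPer_iterate f j _ ⟨k, hk, he⟩⟩
  · have : f (f^[k-1] j) = f^[k-1+1] j := (Function.iterate_succ_apply' f (k-1) j).symm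
    rw [this, show k - 1 + 1 = k by omega]
    exact he

-- an all-non-cycle orbit prefix has pairwise distinct nodes, hence length ≤ n
theorem pvPrefix_le (n : Nat) (f : Nat → Nat) (hf : ∀ i, f i < n) (s t : Nat) (hs : s < n)
    (hpath : ∀ u < t, pvOnC n f (f^[u] s) = false) : t ≤ n := by
  by_contra hgt
  obtain ⟨a, ha, b, hb, hab, he⟩ :=
    Finset.exists_ne_map_eq_of_card_lt_of_maps_to
      (s := Finset.range (n + 1)) (t := Finset.range n)
      (by simp) (fun a _ => Finset.mem_range.mpr (pvIter_lt n f hf s hs a))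
  simp only [Finset.mem_range] at ha hb
  have key : ∀ a b : Nat, a < b → b < n + 1 → f^[a] s = f^[b] s → False := by
    intro a b hlt hbn he
    have hper : pvPer f (f^[a] s) := ⟨b - a, by omega, by
      rw [← Function.iterate_add_apply, show b - a + a = b by omega, he]⟩
    have honc : pvOnC n f (f^[a] s) = true := by
      rw [pvOnC_iff_per n f hf]
      exact ⟨pvIter_lt n f hf s hs a, hper⟩
    rw [hpath a (by omega)] at honc
    exact Bool.false_ne_true honc
  rcases Nat.lt_or_ge a b with hlt | hge
  · exact key a b hlt hb he
  · exact key b a (by omega) ha he.symm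

-- ---------- distance to the cycle ----------
def pvTF (n : Nat) (f : Nat → Nat) : Nat → Nat → Nat
  | 0, _ => 0
  | fuel + 1, s => if pvOnC n f s then 0 else pvTF n f fuel (f s) + 1

def pvT (n : Nat) (f : Nat → Nat) (s : Nat) : Nat := pvTF n f (n + 1) s

theorem pvTF_spec (n : Nat) (f : Nat → Nat) (fuel s t : Nat) (ht : t < fuel)
    (hc : pvOnC n f (f^[t] s) = true) :
    pvOnC n f (f^[pvTF n f fuel s] s) = true ∧
      (∀ u < pvTF n f fuel s, pvOnC n f (f^[u] s) = false) := by
  induction fuel generalizing s t with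
  | zero => omega
  | succ fuel ih =>
    by_cases hc0 : pvOnC n f s = true
    · simp only [pvTF, hc0, if_pos]
      exact ⟨by simpa using hc0, fun u hu => by omega⟩
    · have hc0' : pvOnC n f s = false := by
        cases h : pvOnC n f s <;> simp_all
      have ht0 : t ≠ 0 := by
        rintro rfl
        simp only [Function.iterate_zero_apply] at hc
        rw [hc0'] at hc; exact Bool.false_ne_true hc
      have hrec : pvOnC n f (f^[t - 1] (f s)) = true := by
        have : f^[t-1] (f s) = f^[t-1+1] s := (Function.iterate_succ_apply f (t-1) s).symm
        rw [this, show t - 1 + 1 = t by omega]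
        exact hc
      obtain ⟨ih1, ih2⟩ := ih (f s) (t - 1) (by omega) hrec
      simp only [pvTF, hc0', Bool.false_eq_true, if_false]
      constructor
      · rw [Function.iterate_succ_apply]
        exact ih1
      · intro u hu
        cases u with
        | zero => simpa using hc0'
        | succ u =>
          rw [Function.iterate_succ_apply]
          exact ih2 u (by omega)

theorem pvT_spec (n : Nat) (f : Nat → Nat) (hf : ∀ i, f i < n) (s : Nat) (hs : s < n) :
    pvOnC n f (f^[pvT n f s] s) = true ∧ (∀ u < pvT n f s, pvOnC n f (f^[u] s) = false) := by
  apply pvTF_spec n f (n + 1) s n (by omega)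
  rw [pvOnC_iff]
  exact ⟨s, hs, rfl⟩

theorem pvT_le (n : Nat) (f : Nat → Nat) (hf : ∀ i, f i < n) (s : Nat) (hs : s < n) :
    pvT n f s ≤ n := by
  have h := pvT_spec n f hf s hs
  exact pvPrefix_le n f hf s _ hs h.2

theorem pvT_unique (n : Nat) (f : Nat → Nat) (hf : ∀ i, f i < n) (s : Nat) (hs : s < n)
    (t : Nat) (hc : pvOnC n f (f^[t] s) = true)
    (hp : ∀ u < t, pvOnC n f (f^[u] s) = false) : pvT n f s = t := by
  have h := pvT_spec n f hf s hs
  by_contra hne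
  rcases Nat.lt_or_ge (pvT n f s) t with hlt | hge
  · exact absurd h.1 (by simp [hp _ hlt])
  · exact absurd hc (by simp [h.2 t (by omega)])

theorem pvT_step (n : Nat) (f : Nat → Nat) (hf : ∀ i, f i < n) (s : Nat) (hs : s < n)
    (hnc : pvOnC n f s = false) : pvT n f s = pvT n f (f s) + 1 := by
  have hspec := pvT_spec n f hf (f s) (hf s)
  apply pvT_unique n f hf s hs
  · rw [Function.iterate_succ_apply]
    exact hspec.1
  · intro u hu
    cases u with
    | zero => simpa using hnc
    | succ u =>
      rw [Function.iterate_succ_apply]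
      exact hspec.2 u (by omega)

-- the path condition is exactly "t ≤ pvT"
theorem pvPath_iff_le (n : Nat) (f : Nat → Nat) (hf : ∀ i, f i < n) (s : Nat) (hs : s < n)
    (t : Nat) : (∀ u < t, pvOnC n f (f^[u] s) = false) ↔ t ≤ pvT n f s := by
  have h := pvT_spec n f hf s hs
  constructor
  · intro hp
    by_contra hgt
    exact absurd h.1 (by simp [hp (pvT n f s) (by omega)])
  · intro hle u hu
    exact h.2 u (by omega)

-- ---------- the closed-form chain length ----------
-- pvD j = longest all-non-cycle path ending just before j;  pvC j = A's/B's chain value at j.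
def pvD (n : Nat) (f : Nat → Nat) (j : Nat) : Nat :=
  ((Finset.range n ×ˢ Finset.Icc 1 n).filter
    (fun p => f^[p.2] p.1 = j ∧ ∀ u < p.2, pvOnC n f (f^[u] p.1) = false)).sup (fun p => p.2)

def pvC (n : Nat) (f : Nat → Nat) (j : Nat) : Nat := 1 + pvD n f j

-- the recurrence A's relaxation computes
theorem pvC_rec (n : Nat) (f : Nat → Nat) (hf : ∀ i, f i < n) (j : Nat) :
    pvC n f j =
      max 1 (((Finset.range n).filter (fun p => f p = j ∧ pvOnC n f p = false)).sup
        (fun p => pvC n f p + 1)) := by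
  unfold pvC pvD
  set S := ((Finset.range n ×ˢ Finset.Icc 1 n).filter
    (fun p => f^[p.2] p.1 = j ∧ ∀ u < p.2, pvOnC n f (f^[u] p.1) = false)) with hS
  set Pr := ((Finset.range n).filter (fun p => f p = j ∧ pvOnC n f p = false)) with hPr
  -- membership in S: a pair (s,t) with the path property
  have hmemS : ∀ st : Nat × Nat, st ∈ S ↔ (st.1 < n ∧ 1 ≤ st.2 ∧ st.2 ≤ n ∧ f^[st.2] st.1 = j
      ∧ ∀ u < st.2, pvOnC n f (f^[u] st.1) = false) := by
    intro st
    rw [hS, Finset.mem_filter, Finset.mem_product, Finset.mem_range, Finset.mem_Icc]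
    tauto
  have hmemPr : ∀ p : Nat, p ∈ Pr ↔ (p < n ∧ f p = j ∧ pvOnC n f p = false) := by
    intro p
    rw [hPr, Finset.mem_filter, Finset.mem_range]
    try tauto
  apply Nat.le_antisymm
  · -- 1 + S.sup ≤ RHS
    rcases Finset.eq_empty_or_nonempty S with he | hne
    · rw [he]; simp
    · obtain ⟨⟨s, t⟩, hmem, hsup⟩ := Finset.exists_mem_eq_sup S hne (fun p => p.2)
      rw [hsup]
      obtain ⟨hsn, ht1, htn, hft, hpath⟩ := (hmemS (s, t)).mp hmem
      simp only at hsn ht1 htn hft hpath ⊢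
      -- p := f^[t-1] s is a non-cycle predecessor of j
      have hp : f^[t - 1] s ∈ Pr := by
        rw [hmemPr]
        refine ⟨pvIter_lt n f hf s hsn _, ?_, hpath (t - 1) (by omega)⟩
        have : f (f^[t-1] s) = f^[t-1+1] s := (Function.iterate_succ_apply' f (t-1) s).symm
        rw [this, show t - 1 + 1 = t by omega]
        exact hft
      have hDp : t - 1 ≤ pvD n f (f^[t - 1] s) := by
        rcases Nat.eq_or_lt_of_le ht1 with h1 | h2
        · omega
        · -- t ≥ 2: the pair (s, t-1) witnesses a path to p
          unfold pvD
          apply Finset.le_sup (f := fun p : Nat × Nat => p.2) (b := (s, t - 1))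
          rw [Finset.mem_filter, Finset.mem_product, Finset.mem_range, Finset.mem_Icc]
          exact ⟨⟨hsn, by omega, by omega⟩, rfl, fun u hu => hpath u (by omega)⟩
      have : 1 + t ≤ pvC n f (f^[t - 1] s) + 1 := by
        unfold pvC
        omega
      calc 1 + t ≤ pvC n f (f^[t-1] s) + 1 := this
        _ ≤ Pr.sup (fun p => pvC n f p + 1) := Finset.le_sup (f := fun p => pvC n f p + 1) hp
        _ ≤ max 1 (Pr.sup (fun p => pvC n f p + 1)) := le_max_right _ _
  · -- RHS ≤ 1 + S.sup
    rw [max_le_iff]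
    refine ⟨by omega, ?_⟩
    apply Finset.sup_le
    intro p hp
    obtain ⟨hpn, hfp, hpnc⟩ := (hmemPr p).mp hp
    have hn0 : 0 < n := by omega
    -- pvD j ≥ pvD p + 1
    have hkey : pvD n f p + 1 ≤ S.sup (fun p => p.2) := by
      rcases Nat.eq_zero_or_pos (pvD n f p) with h0 | hpos
      · rw [h0]
        apply Finset.le_sup (f := fun p : Nat × Nat => p.2) (b := (p, 1))
        rw [hmemS (p, 1)]
        exact ⟨hpn, le_refl 1, by omega, by simpa using hfp,
          fun u hu => by interval_cases u <;> simpa using hpnc⟩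
      · have hne : (((Finset.range n ×ˢ Finset.Icc 1 n).filter
            (fun q => f^[q.2] q.1 = p ∧ ∀ u < q.2, pvOnC n f (f^[u] q.1) = false))).Nonempty := by
          by_contra hcon
          rw [Finset.not_nonempty_iff_eq_empty] at hcon
          unfold pvD at hpos
          rw [hcon] at hpos
          simp at hpos
        obtain ⟨⟨s, t⟩, hmem, hsup⟩ := Finset.exists_mem_eq_sup _ hne (fun q : Nat × Nat => q.2)
        have hmem' : (s, t).1 < n ∧ 1 ≤ (s, t).2 ∧ (s, t).2 ≤ n ∧ f^[(s, t).2] (s, t).1 = p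
            ∧ ∀ u < (s, t).2, pvOnC n f (f^[u] (s, t).1) = false := by
          rw [Finset.mem_filter, Finset.mem_product, Finset.mem_range, Finset.mem_Icc] at hmem
          tauto
        obtain ⟨hsn, ht1, htn, hft, hpath⟩ := hmem'
        simp only at hsn ht1 htn hft hpath
        have hDp : pvD n f p = t := by unfold pvD; rw [hsup]
        have hpath' : ∀ u < t + 1, pvOnC n f (f^[u] s) = false := by
          intro u hu
          rcases Nat.lt_or_ge u t with h | h
          · exact hpath u h
          · have : u = t := by omega
            rw [this, hft]
            exact hpnc
        have htn' : t + 1 ≤ n := pvPrefix_le n f hf s (t + 1) hsn hpath'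
        rw [hDp]
        apply Finset.le_sup (f := fun p : Nat × Nat => p.2) (b := (s, t + 1))
        rw [hmemS (s, t + 1)]
        refine ⟨hsn, by omega, htn', ?_, hpath'⟩
        show f^[t+1] s = j
        rw [Function.iterate_succ_apply', hft, hfp]
    unfold pvD at hkey
    omega

-- ---------- B-side: per-start walk contribution ----------
def pvW (n : Nat) (f : Nat → Nat) (s t j : Nat) : Nat :=
  ((Finset.Icc t (pvT n f s)).filter (fun t' => f^[t'] s = j)).sup (fun t' => t' + 1)

def pvCB (n : Nat) (f : Nat → Nat) (k j : Nat) : Nat :=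
  max 1 (((Finset.range k).filter (fun s => pvOnC n f s = false)).sup (fun s => pvW n f s 1 j))

theorem pvCB_eq_pvC (n : Nat) (f : Nat → Nat) (hf : ∀ i, f i < n) (j : Nat) :
    pvCB n f n j = pvC n f j := by
  unfold pvCB pvC
  apply Nat.le_antisymm
  · rw [max_le_iff]
    constructor
    · omega
    · apply Finset.sup_le
      intro s hsmem
      rw [Finset.mem_filter, Finset.mem_range] at hsmem
      obtain ⟨hsn, hsnc⟩ := hsmem
      unfold pvW
      apply Finset.sup_le
      intro t' ht'
      rw [Finset.mem_filter, Finset.mem_Icc] at ht'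
      obtain ⟨⟨h1, h2⟩, h3⟩ := ht'
      have : t' ≤ pvD n f j := by
        unfold pvD
        apply Finset.le_sup (f := fun p : Nat × Nat => p.2) (b := (s, t'))
        rw [Finset.mem_filter, Finset.mem_product, Finset.mem_range, Finset.mem_Icc]
        refine ⟨⟨hsn, h1, le_trans h2 (pvT_le n f hf s hsn)⟩, h3, ?_⟩
        exact (pvPath_iff_le n f hf s hsn t').mpr h2
      omega
  · rcases Nat.eq_zero_or_pos (pvD n f j) with h0 | hpos
    · rw [h0]; omega
    · have hne : ((Finset.range n ×ˢ Finset.Icc 1 n).filter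
          (fun p => f^[p.2] p.1 = j ∧ ∀ u < p.2, pvOnC n f (f^[u] p.1) = false)).Nonempty := by
        by_contra hcon
        rw [Finset.not_nonempty_iff_eq_empty] at hcon
        unfold pvD at hpos
        rw [hcon] at hpos
        simp at hpos
      obtain ⟨⟨s, t⟩, hmem, hsup⟩ := Finset.exists_mem_eq_sup _ hne (fun q : Nat × Nat => q.2)
      rw [Finset.mem_filter, Finset.mem_product, Finset.mem_range, Finset.mem_Icc] at hmem
      obtain ⟨⟨hsn, ht1, htn⟩, hft, hpath⟩ := hmem
      simp only at hsn ht1 htn hft hpath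
      have hD : pvD n f j = t := by unfold pvD; rw [hsup]
      rw [hD]
      have hsnc : pvOnC n f s = false := by
        have := hpath 0 (by omega)
        simpa using this
      have hW : t + 1 ≤ pvW n f s 1 j := by
        unfold pvW
        apply Finset.le_sup (f := fun t' => t' + 1) (b := t)
        rw [Finset.mem_filter, Finset.mem_Icc]
        exact ⟨⟨ht1, (pvPath_iff_le n f hf s hsn t).mp hpath⟩, hft⟩
      have hNC : pvW n f s 1 j ≤ ((Finset.range n).filter
          (fun s => pvOnC n f s = false)).sup (fun s => pvW n f s 1 j) := by
        apply Finset.le_sup (f := fun s => pvW n f s 1 j)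
        rw [Finset.mem_filter, Finset.mem_range]
        exact ⟨hsn, hsnc⟩
      have := le_max_right 1 (((Finset.range n).filter
          (fun s => pvOnC n f s = false)).sup (fun s => pvW n f s 1 j))
      omega

-- ---------- A-side: indegrees and partial chain values ----------
def pvdeg (n : Nat) (f : Nat → Nat) (P : Finset Nat) (j : Nat) : Nat :=
  (((Finset.range n).filter (fun p => f p = j ∧ p ∉ P))).card

def pvK (n : Nat) (f : Nat → Nat) (P : Finset Nat) (j : Nat) : Nat :=
  max 1 (((Finset.range n).filter (fun p => f p = j ∧ p ∈ P)).sup (fun p => pvC n f p + 1))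

theorem pvdeg_mono (n : Nat) (f : Nat → Nat) (P : Finset Nat) (c j : Nat) :
    pvdeg n f (insert c P) j ≤ pvdeg n f P j := by
  unfold pvdeg
  apply Finset.card_le_card
  intro p hp
  rw [Finset.mem_filter] at *
  exact ⟨hp.1, hp.2.1, fun h => hp.2.2 (Finset.mem_insert_of_mem h)⟩

theorem pvdeg_pred_mem (n : Nat) (f : Nat → Nat) (P : Finset Nat) (c : Nat) (hc : c < n)
    (hcP : c ∉ P) : c ∈ (Finset.range n).filter (fun p => f p = f c ∧ p ∉ P) := by
  rw [Finset.mem_filter, Finset.mem_range]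
  exact ⟨hc, rfl, hcP⟩

theorem pvdeg_pos (n : Nat) (f : Nat → Nat) (P : Finset Nat) (c : Nat) (hc : c < n)
    (hcP : c ∉ P) : 1 ≤ pvdeg n f P (f c) := by
  unfold pvdeg
  rw [Nat.succ_le_iff, Finset.card_pos]
  exact ⟨c, pvdeg_pred_mem n f P c hc hcP⟩

theorem pvdeg_insert (n : Nat) (f : Nat → Nat) (P : Finset Nat) (c j : Nat) (hc : c < n)
    (hcP : c ∉ P) :
    pvdeg n f (insert c P) j = if f c = j then pvdeg n f P j - 1 else pvdeg n f P j := by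
  unfold pvdeg
  by_cases he : f c = j
  · rw [if_pos he]
    have : (Finset.range n).filter (fun p => f p = j ∧ p ∉ insert c P)
        = ((Finset.range n).filter (fun p => f p = j ∧ p ∉ P)).erase c := by
      ext p
      rw [Finset.mem_erase, Finset.mem_filter, Finset.mem_filter, Finset.mem_range,
        Finset.mem_insert]
      constructor
      · rintro ⟨h1, h2, h3⟩
        exact ⟨fun hpc => h3 (Or.inl hpc), h1, h2, fun hp => h3 (Or.inr hp)⟩
      · rintro ⟨h0, h1, h2, h3⟩
        exact ⟨h1, h2, fun h => h.elim (fun a => h0 a) h3⟩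
    rw [this, Finset.card_erase_of_mem (by rw [← he] at *; exact pvdeg_pred_mem n f P c hc hcP)]
  · rw [if_neg he]
    congr 1
    apply Finset.filter_congr
    intro p hp
    rw [Finset.mem_insert]
    constructor
    · rintro ⟨h1, h2⟩
      exact ⟨h1, fun hp2 => h2 (Or.inr hp2)⟩
    · rintro ⟨h1, h2⟩
      refine ⟨h1, fun h => ?_⟩
      rcases h with h | h
      · rw [h] at h1; exact he h1
      · exact h2 h

theorem pvK_insert (n : Nat) (f : Nat → Nat) (P : Finset Nat) (c j : Nat) (hc : c < n)
    (hcP : c ∉ P) :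
    pvK n f (insert c P) j
      = if f c = j then max (pvK n f P j) (pvC n f c + 1) else pvK n f P j := by
  unfold pvK
  by_cases he : f c = j
  · rw [if_pos he]
    have : (Finset.range n).filter (fun p => f p = j ∧ p ∈ insert c P)
        = insert c ((Finset.range n).filter (fun p => f p = j ∧ p ∈ P)) := by
      ext p
      rw [Finset.mem_insert, Finset.mem_filter, Finset.mem_filter, Finset.mem_range,
        Finset.mem_insert]
      constructor
      · rintro ⟨h1, h2, h3⟩
        rcases h3 with h3 | h3
        · exact Or.inl h3
        · exact Or.inr ⟨h1, h2, h3⟩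
      · rintro (h | ⟨h1, h2, h3⟩)
        · rw [h]; exact ⟨hc, he, Or.inl rfl⟩
        · exact ⟨h1, h2, Or.inr h3⟩
    rw [this, Finset.sup_insert, max_left_comm, max_comm]
  · rw [if_neg he]
    congr 2
    apply Finset.filter_congr
    intro p hp
    rw [Finset.mem_insert]
    constructor
    · rintro ⟨h1, h2⟩
      rcases h2 with h2 | h2
      · rw [h2] at h1; exact absurd h1 he
      · exact ⟨h1, h2⟩
    · rintro ⟨h1, h2⟩
      exact ⟨h1, Or.inr h2⟩

theorem pvK_eq_pvC (n : Nat) (f : Nat → Nat) (hf : ∀ i, f i < n) (P : Finset Nat)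
    (hPnc : ∀ p ∈ P, pvOnC n f p = false) (j : Nat) (hdeg : pvdeg n f P j = 0) :
    pvK n f P j = pvC n f j := by
  rw [pvC_rec n f hf j]
  unfold pvK
  congr 2
  apply Finset.filter_congr
  intro p hp
  rw [Finset.mem_range] at hp
  have hempty : ∀ q, ¬(q ∈ (Finset.range n).filter (fun p => f p = j ∧ p ∉ P)) := by
    unfold pvdeg at hdeg
    rw [Finset.card_eq_zero] at hdeg
    rw [hdeg]
    simp
  constructor
  · rintro ⟨h1, h2⟩
    exact ⟨h1, hPnc p h2⟩
  · rintro ⟨h1, h2⟩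
    refine ⟨h1, ?_⟩
    by_contra hnp
    exact hempty p (by rw [Finset.mem_filter, Finset.mem_range]; exact ⟨hp, h1, hnp⟩)

theorem pvQueue_nc (n : Nat) (f : Nat → Nat) (hf : ∀ i, f i < n) (P : Finset Nat)
    (hPnc : ∀ p ∈ P, pvOnC n f p = false) (j : Nat) (hj : j < n)
    (hdeg : pvdeg n f P j = 0) : pvOnC n f j = false := by
  by_contra hcon
  have honc : pvOnC n f j = true := by cases h : pvOnC n f j <;> simp_all
  obtain ⟨c, hc1, hc2, hc3⟩ := pvOnC_pred n f hf j honc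
  have hcP : c ∉ P := fun h => by rw [hPnc c h] at hc2; exact Bool.false_ne_true hc2
  have := pvdeg_pos n f P c hc1 hcP
  rw [hc3] at this
  omega

theorem pvComplete (n : Nat) (f : Nat → Nat) (hf : ∀ i, f i < n)
    (P : Finset Nat) (hPnc : ∀ p ∈ P, pvOnC n f p = false)
    (hnoq : ∀ j < n, ¬(j ∉ P ∧ pvdeg n f P j = 0)) :
    ∀ j < n, pvOnC n f j = false → j ∈ P := by
  intro j hj hjnc
  by_contra hjP
  set U := (Finset.range n).filter (fun u => pvOnC n f u = false ∧ u ∉ P) with hU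
  have hUne : U.Nonempty :=
    ⟨j, by rw [hU, Finset.mem_filter, Finset.mem_range]; exact ⟨hj, hjnc, hjP⟩⟩
  obtain ⟨u, huU, humax⟩ := Finset.exists_max_image U (pvT n f) hUne
  rw [hU, Finset.mem_filter, Finset.mem_range] at huU
  obtain ⟨hun, hunc, hunP⟩ := huU
  have hdeg : pvdeg n f P u ≠ 0 := fun h => hnoq u hun ⟨hunP, h⟩
  have hne : ((Finset.range n).filter (fun p => f p = u ∧ p ∉ P)).Nonempty := by
    rw [Finset.nonempty_iff_ne_empty]
    intro hcon
    unfold pvdeg at hdeg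
    rw [hcon] at hdeg
    simp at hdeg
  obtain ⟨p, hp⟩ := hne
  rw [Finset.mem_filter, Finset.mem_range] at hp
  obtain ⟨hpn, hpf, hpP⟩ := hp
  have hpnc : pvOnC n f p = false := by
    by_contra hcon
    have : pvOnC n f p = true := by cases h : pvOnC n f p <;> simp_all
    have := pvOnC_f n f hf p this
    rw [hpf, hunc] at this
    exact Bool.false_ne_true this
  have hpU : p ∈ U := by
    rw [hU, Finset.mem_filter, Finset.mem_range]
    exact ⟨hpn, hpnc, hpP⟩
  have hstep : pvT n f p = pvT n f u + 1 := by
    rw [← hpf]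
    exact pvT_step n f hf p hpn hpnc
  have := humax p hpU
  omega

-- ---------- instantiation on the favorite list ----------
-- the favorite map, normalized to Nat positions
def pvfm (favorite : List Int) : Nat → Nat :=
  fun i => pvIdx favorite.length (favorite.getD i 0)

theorem pvfm_lt (favorite : List Int) (hn : 0 < favorite.length) (i : Nat) :
    pvfm favorite i < favorite.length := pvIdx_lt _ _ hn

theorem pvElt (favorite : List Int) (hPre : Pre_calculate_mutual_chains favorite)
    (i : Nat) (hi : i < favorite.length) :
    PySem.Raise.InRange favorite.length (favorite.getD i 0) := by
  have hm : favorite.getD i 0 ∈ favorite := by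
    rw [List.getD_eq_getElem favorite 0 hi]; exact List.getElem_mem hi
  exact ⟨(hPre _ hm).1, (hPre _ hm).2⟩

theorem pvAt_fm (favorite : List Int) (hPre : Pre_calculate_mutual_chains favorite)
    (hn : 0 < favorite.length) (q : Int) (hq : PySem.Raise.InRange favorite.length q) :
    pvAt favorite q = favorite.getD (pvIdx favorite.length q) 0 ∧
      PySem.Raise.InRange favorite.length (pvAt favorite q) ∧
      pvIdx favorite.length (pvAt favorite q) = pvfm favorite (pvIdx favorite.length q) := by
  have he := pvAt_eq favorite q hq
  refine ⟨he, ?_, by rw [he]; rfl⟩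
  rw [he]; exact pvElt favorite hPre _ (pvIdx_lt _ _ hn)

theorem pvGetD_set {α : Type} (l : List α) (m j : Nat) (v d : α) (hj : j < l.length) :
    (l.set m v).getD j d = if m = j then v else l.getD j d := by
  have hj' : j < (l.set m v).length := by simpa using hj
  rw [List.getD_eq_getElem _ _ hj', List.getD_eq_getElem _ _ hj]
  rw [List.getElem_set]

-- the inner `for _ in range(n): j = favorite[j]` fold follows the iterates of pvfm
theorem pvStepFold (favorite : List Int) (hPre : Pre_calculate_mutual_chains favorite)
    (hn : 0 < favorite.length) (k : Nat) (q : Int)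
    (hq : PySem.Raise.InRange favorite.length q) :
    PySem.Raise.InRange favorite.length
        ((List.range k).foldl (fun j _ => pvAt favorite j) q) ∧
      pvIdx favorite.length ((List.range k).foldl (fun j _ => pvAt favorite j) q)
        = (pvfm favorite)^[k] (pvIdx favorite.length q) := by
  induction k with
  | zero => simpa using hq
  | succ k ih =>
    rw [List.range_succ, List.foldl_append]
    obtain ⟨ih1, ih2⟩ := ih
    obtain ⟨_, h2, h3⟩ := pvAt_fm favorite hPre hn _ ih1
    refine ⟨h2, ?_⟩
    simp only [List.foldl_cons, List.foldl_nil]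
    rw [h3, ih2]
    exact (Function.iterate_succ_apply' (pvfm favorite) k (pvIdx favorite.length q)).symm

-- the on_cycle list built by B
theorem pvOnCList (favorite : List Int) (hPre : Pre_calculate_mutual_chains favorite)
    (hn : 0 < favorite.length) :
    ((List.range favorite.length).foldl (fun acc s =>
        PySem.List.pySetD acc
          ((List.range favorite.length).foldl (fun j _ => pvAt favorite j) (Int.ofNat s)) true)
      (List.replicate favorite.length false)).length = favorite.length ∧
    ∀ j < favorite.length,
      ((List.range favorite.length).foldl (fun acc s =>
          PySem.List.pySetD acc
            ((List.range favorite.length).foldl (fun j _ => pvAt favorite j) (Int.ofNat s)) true)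
        (List.replicate favorite.length false)).getD j false
        = pvOnC favorite.length (pvfm favorite) j := by
  suffices H : ∀ k ≤ favorite.length,
      ((List.range k).foldl (fun acc s =>
          PySem.List.pySetD acc
            ((List.range favorite.length).foldl (fun j _ => pvAt favorite j) (Int.ofNat s)) true)
        (List.replicate favorite.length false)).length = favorite.length ∧
      ∀ j < favorite.length,
        ((List.range k).foldl (fun acc s =>
            PySem.List.pySetD acc
              ((List.range favorite.length).foldl (fun j _ => pvAt favorite j) (Int.ofNat s)) true)
          (List.replicate favorite.length false)).getD j false
          = (List.range k).any (fun s => (pvfm favorite)^[favorite.length] s == j) by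
    obtain ⟨h1, h2⟩ := H favorite.length le_rfl
    exact ⟨h1, fun j hj => by rw [h2 j hj]; rfl⟩
  intro k
  induction k with
  | zero => intro _; simp
  | succ k ih =>
    intro hk1
    obtain ⟨ih1, ih2⟩ := ih (by omega)
    rw [List.range_succ, List.foldl_append]
    simp only [List.foldl_cons, List.foldl_nil]
    have hin : PySem.Raise.InRange favorite.length (Int.ofNat k) := by
      constructor <;> simp <;> omega
    obtain ⟨hv1, hv2⟩ := pvStepFold favorite hPre hn favorite.length (Int.ofNat k) hin
    have hvidx : pvIdx favorite.length
        ((List.range favorite.length).foldl (fun j _ => pvAt favorite j) (Int.ofNat k))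
        = (pvfm favorite)^[favorite.length] k := by
      rw [hv2, pvIdx_ofNat _ _ (by omega)]
    have hset := pySetD_idx (l := (List.range k).foldl (fun acc s =>
        PySem.List.pySetD acc
          ((List.range favorite.length).foldl (fun j _ => pvAt favorite j) (Int.ofNat s)) true)
      (List.replicate favorite.length false))
      ((List.range favorite.length).foldl (fun j _ => pvAt favorite j) (Int.ofNat k)) true
      (by rw [ih1]; exact hv1)
    rw [hset]
    constructor
    · simpa using ih1
    · intro j hj
      rw [pvGetD_set _ _ _ _ _ (by rw [ih1]; exact hj), ih1, hvidx]
      rw [List.any_append]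
      by_cases heq : (pvfm favorite)^[favorite.length] k = j
      · simp [heq]
      · simp only [List.any_cons, List.any_nil]
        rw [ih2 j hj]
        simp [heq]

-- B's walk accumulates exactly the pvW contributions of its start node
theorem pvWalk_spec (favorite : List Int) (onCL : List Bool)
    (hPre : Pre_calculate_mutual_chains favorite) (hn : 0 < favorite.length)
    (honl : onCL.length = favorite.length)
    (honc : ∀ j < favorite.length,
      onCL.getD j false = pvOnC favorite.length (pvfm favorite) j) :
    ∀ (fuel t s : Nat) (j : Int) (chain : List Int),
      s < favorite.length → 1 ≤ t → t ≤ pvT favorite.length (pvfm favorite) s →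
      PySem.Raise.InRange favorite.length j →
      pvIdx favorite.length j = (pvfm favorite)^[t] s →
      chain.length = favorite.length → (∀ j' < favorite.length, 1 ≤ chain.getD j' 0) →
      pvT favorite.length (pvfm favorite) s + 1 - t ≤ fuel →
      (pvBWalk favorite onCL fuel j ((t : Int) + 1) chain).length = favorite.length ∧
      (∀ j' < favorite.length,
        (pvBWalk favorite onCL fuel j ((t : Int) + 1) chain).getD j' 0
          = max (chain.getD j' 0) ((pvW favorite.length (pvfm favorite) s t j' : Nat) : Int)) ∧
      (∀ j' < favorite.length,
        1 ≤ (pvBWalk favorite onCL fuel j ((t : Int) + 1) chain).getD j' 0) := by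
  have hf : ∀ i, pvfm favorite i < favorite.length := pvfm_lt favorite hn
  intro fuel
  induction fuel with
  | zero =>
    intro t s j chain hs ht1 htle hjin hjidx hlen hpos hfuel
    have := pvT_spec favorite.length (pvfm favorite) hf s hs
    omega
  | succ fuel ih =>
    intro t s j chain hs ht1 htle hjin hjidx hlen hpos hfuel
    set n := favorite.length with hnn
    set fm := pvfm favorite with hfm
    set m := (fm)^[t] s with hm
    have hmn : m < n := pvIter_lt n fm hf s hs t
    have hjin' : PySem.Raise.InRange chain.length j := by rw [hlen]; exact hjin
    have hAt : pvAt chain j = chain.getD m 0 := by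
      rw [pvAt_eq chain j hjin', hlen, hjidx]
    -- the conditional update is a pointwise max
    have hchain' :
        (if pvAt chain j < (t : Int) + 1 then pvPut chain j ((t : Int) + 1) else chain).length = n ∧
        (∀ j' < n, (if pvAt chain j < (t : Int) + 1 then pvPut chain j ((t : Int) + 1)
            else chain).getD j' 0
          = if m = j' then max (chain.getD j' 0) ((t : Int) + 1) else chain.getD j' 0) := by
      by_cases hlt : pvAt chain j < (t : Int) + 1
      · rw [if_pos hlt]
        have hput : pvPut chain j ((t : Int) + 1) = chain.set m ((t : Int) + 1) := by
          rw [pvPut_eq chain j _ hjin', hlen, hjidx]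
        rw [hput]
        refine ⟨by simpa using hlen, fun j' hj' => ?_⟩
        rw [pvGetD_set _ _ _ _ _ (by rw [hlen]; exact hj')]
        by_cases he : m = j'
        · rw [if_pos he, if_pos he, max_eq_right]
          rw [hAt, he] at hlt
          omega
        · rw [if_neg he, if_neg he]
      · rw [if_neg hlt]
        refine ⟨hlen, fun j' hj' => ?_⟩
        by_cases he : m = j'
        · rw [if_pos he, max_eq_left]
          rw [hAt, he] at hlt
          omega
        · rw [if_neg he]
    obtain ⟨hc'len, hc'get⟩ := hchain'
    have hc'pos : ∀ j' < n, 1 ≤ (if pvAt chain j < (t : Int) + 1 then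
        pvPut chain j ((t : Int) + 1) else chain).getD j' 0 := by
      intro j' hj'
      rw [hc'get j' hj']
      have := hpos j' hj'
      by_cases he : m = j'
      · rw [if_pos he]; exact le_trans this (le_max_left _ _)
      · rw [if_neg he]; exact this
    -- the on_cycle test reads pvOnC at m
    have hcond : PySem.List.pyGetD onCL j false = pvOnC n fm m := by
      have hjin'' : PySem.Raise.InRange onCL.length j := by rw [honl]; exact hjin
      rw [pyGetD_idx onCL j false hjin'', honl, hjidx]
      exact honc m hmn
    show (pvBWalk favorite onCL (fuel + 1) j ((t : Int) + 1) chain).length = n ∧ _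
    rw [pvBWalk]
    by_cases honcm : pvOnC n fm m = true
    · rw [hcond, honcm, if_pos rfl]
      -- the walk stops here: t is exactly the distance to the cycle
      have hT : pvT n fm s = t := by
        apply pvT_unique n fm hf s hs
        · rw [← hm]; exact honcm
        · exact (pvPath_iff_le n fm hf s hs t).mpr htle
      have hW : ∀ j' : Nat, pvW n fm s t j' = if m = j' then t + 1 else 0 := by
        intro j'
        unfold pvW
        rw [hT, Finset.Icc_self, Finset.filter_singleton]
        by_cases he : m = j'
        · rw [if_pos (by rw [← hm, he]), if_pos he, Finset.sup_singleton]
        · rw [if_neg (by rw [← hm]; exact he), if_neg he]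
          rfl
      refine ⟨hc'len, fun j' hj' => ?_, fun j' hj' => hc'pos j' hj'⟩
      rw [hc'get j' hj', hW j']
      by_cases he : m = j'
      · rw [if_pos he, if_pos he]
        push_cast
        rfl
      · rw [if_neg he, if_neg he]
        have := hpos j' hj'
        simp only [Nat.cast_zero]
        rw [max_eq_left (by omega)]
    · have honcm' : pvOnC n fm m = false := by
        cases h : pvOnC n fm m <;> simp_all
      rw [hcond, honcm']
      simp only [Bool.false_eq_true, if_false]
      -- continue the walk one step further
      have hTspec := pvT_spec n fm hf s hs
      have htlt : t < pvT n fm s := by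
        rcases Nat.eq_or_lt_of_le htle with h1 | h2
        · exfalso
          have hfalse : pvOnC n fm (fm^[pvT n fm s] s) = false := by
            rw [← h1, ← hm]; exact honcm'
          rw [hfalse] at hTspec
          exact Bool.false_ne_true hTspec.1
        · exact h2
      obtain ⟨hat1, hat2, hat3⟩ := pvAt_fm favorite hPre hn j hjin
      have hidx' : pvIdx n (pvAt favorite j) = (fm)^[t + 1] s := by
        rw [hat3, hjidx]
        exact (Function.iterate_succ_apply' fm t s).symm
      have hcast : (t : Int) + 1 + 1 = ((t + 1 : Nat) : Int) + 1 := by push_cast; ring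
      rw [hcast]
      obtain ⟨ihl, ihg, ihp⟩ := ih (t + 1) s (pvAt favorite j) _ hs (by omega) (by omega)
        hat2 hidx' hc'len hc'pos (by omega)
      refine ⟨ihl, fun j' hj' => ?_, fun j' hj' => ihp j' hj'⟩
      rw [ihg j' hj', hc'get j' hj']
      -- pvW s t = max (contribution of step t) (pvW s (t+1))
      have hWeq : ∀ j' : Nat, pvW n fm s t j' = max (if m = j' then t + 1 else 0) (pvW n fm s (t + 1) j') := by
        intro j''
        apply Nat.le_antisymm
        · unfold pvW
          apply Finset.sup_le
          intro x hx
          rw [Finset.mem_filter, Finset.mem_Icc] at hx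
          obtain ⟨⟨hx1, hx2⟩, hx3⟩ := hx
          rcases Nat.eq_or_lt_of_le hx1 with hxe | hxl
          · rw [← hxe] at hx3
            rw [← hm] at hx3
            rw [if_pos hx3, ← hxe]
            exact le_max_left _ _
          · refine le_trans ?_ (le_max_right _ _)
            apply Finset.le_sup (f := fun t' => t' + 1)
            rw [Finset.mem_filter, Finset.mem_Icc]
            exact ⟨⟨hxl, hx2⟩, hx3⟩
        · rw [max_le_iff]
          constructor
          · by_cases he : m = j''
            · rw [if_pos he]
              apply Finset.le_sup (f := fun t' => t' + 1) (b := t)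
              rw [Finset.mem_filter, Finset.mem_Icc]
              exact ⟨⟨le_refl t, by omega⟩, by rw [← hm]; exact he⟩
            · rw [if_neg he]
              exact Nat.zero_le _
          · unfold pvW
            apply Finset.sup_le
            intro x hx
            rw [Finset.mem_filter, Finset.mem_Icc] at hx
            apply Finset.le_sup (f := fun t' => t' + 1)
            rw [Finset.mem_filter, Finset.mem_Icc]
            exact ⟨⟨by omega, hx.1.2⟩, hx.2⟩
      rw [hWeq j']
      by_cases he : m = j'
      · rw [if_pos he, if_pos he]
        push_cast
        rw [max_assoc]
      · rw [if_neg he, if_neg he]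
        rw [Nat.zero_max]

-- B's chain list equals the closed form
theorem pvChainB (favorite : List Int) (hPre : Pre_calculate_mutual_chains favorite)
    (hn : 0 < favorite.length) (onCL : List Bool)
    (honl : onCL.length = favorite.length)
    (honc : ∀ j < favorite.length,
      onCL.getD j false = pvOnC favorite.length (pvfm favorite) j) :
    ∀ j < favorite.length,
      ((List.range favorite.length).foldl (fun ch s =>
          if PySem.List.pyGetD onCL (Int.ofNat s) false then ch
          else pvBWalk favorite onCL (favorite.length + 1) (pvAt favorite (Int.ofNat s)) 2 ch)
        (List.replicate favorite.length (1 : Int))).getD j 0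
        = (pvC favorite.length (pvfm favorite) j : Int) := by
  have hf : ∀ i, pvfm favorite i < favorite.length := pvfm_lt favorite hn
  suffices H : ∀ k ≤ favorite.length,
      ((List.range k).foldl (fun ch s =>
          if PySem.List.pyGetD onCL (Int.ofNat s) false then ch
          else pvBWalk favorite onCL (favorite.length + 1) (pvAt favorite (Int.ofNat s)) 2 ch)
        (List.replicate favorite.length (1 : Int))).length = favorite.length ∧
      ∀ j < favorite.length,
        ((List.range k).foldl (fun ch s =>
            if PySem.List.pyGetD onCL (Int.ofNat s) false then ch
            else pvBWalk favorite onCL (favorite.length + 1) (pvAt favorite (Int.ofNat s)) 2 ch)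
          (List.replicate favorite.length (1 : Int))).getD j 0
          = (pvCB favorite.length (pvfm favorite) k j : Int) by
    intro j hj
    obtain ⟨h1, h2⟩ := H favorite.length le_rfl
    rw [h2 j hj, pvCB_eq_pvC favorite.length (pvfm favorite) hf j]
  intro k
  induction k with
  | zero =>
    intro _
    refine ⟨by simp, fun j hj => ?_⟩
    simp [pvCB, List.getD, List.getElem?_replicate, hj]
  | succ k ih =>
    intro hk1
    obtain ⟨ih1, ih2⟩ := ih (by omega)
    rw [List.range_succ, List.foldl_append]
    simp only [List.foldl_cons, List.foldl_nil]
    have hkin : PySem.Raise.InRange favorite.length (Int.ofNat k) := by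
      constructor <;> simp <;> omega
    have hcond : PySem.List.pyGetD onCL (Int.ofNat k) false
        = pvOnC favorite.length (pvfm favorite) k := by
      have hkin' : PySem.Raise.InRange onCL.length (Int.ofNat k) := by rw [honl]; exact hkin
      rw [pyGetD_idx onCL _ false hkin', honl, pvIdx_ofNat _ _ (by omega)]
      exact honc k (by omega)
    by_cases honck : pvOnC favorite.length (pvfm favorite) k = true
    · rw [hcond, honck, if_pos rfl]
      refine ⟨ih1, fun j hj => ?_⟩
      rw [ih2 j hj]
      congr 1
      unfold pvCB
      congr 1
      rw [Finset.range_add_one, Finset.filter_insert, if_neg (by rw [honck]; simp)]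
    · have honck' : pvOnC favorite.length (pvfm favorite) k = false := by
        cases h : pvOnC favorite.length (pvfm favorite) k <;> simp_all
      rw [hcond, honck']
      simp only [Bool.false_eq_true, if_false]
      have hT1 : 1 ≤ pvT favorite.length (pvfm favorite) k := by
        by_contra hT0
        have hspec := pvT_spec favorite.length (pvfm favorite) hf k (by omega)
        have : pvT favorite.length (pvfm favorite) k = 0 := by omega
        rw [this] at hspec
        simp only [Function.iterate_zero_apply] at hspec
        rw [honck'] at hspec
        exact Bool.false_ne_true hspec.1
      obtain ⟨hat1, hat2, hat3⟩ := pvAt_fm favorite hPre hn _ hkin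
      have hidx1 : pvIdx favorite.length (pvAt favorite (Int.ofNat k))
          = (pvfm favorite)^[1] k := by
        rw [hat3, pvIdx_ofNat _ _ (by omega), Function.iterate_one]
      have hpos : ∀ j' < favorite.length,
          1 ≤ ((List.range k).foldl (fun ch s =>
            if PySem.List.pyGetD onCL (Int.ofNat s) false then ch
            else pvBWalk favorite onCL (favorite.length + 1) (pvAt favorite (Int.ofNat s)) 2 ch)
          (List.replicate favorite.length (1 : Int))).getD j' 0 := by
        intro j' hj'
        rw [ih2 j' hj']
        have : 1 ≤ pvCB favorite.length (pvfm favorite) k j' := le_max_left 1 _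
        omega
      have h2eq : (2 : Int) = ((1 : Nat) : Int) + 1 := by norm_num
      obtain ⟨wl, wg, wp⟩ := pvWalk_spec favorite onCL hPre hn honl honc
        (favorite.length + 1) 1 k (pvAt favorite (Int.ofNat k)) _
        (by omega) le_rfl hT1 hat2 hidx1 ih1 hpos
        (by have := pvT_le favorite.length (pvfm favorite) hf k (by omega); omega)
      rw [← h2eq] at wl wg wp
      refine ⟨wl, fun j hj => ?_⟩
      rw [wg j hj, ih2 j hj]
      -- pvCB (k+1) = max (pvCB k) (W k 1 ·)
      have hcb : pvCB favorite.length (pvfm favorite) (k + 1) j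
          = max (pvCB favorite.length (pvfm favorite) k j)
              (pvW favorite.length (pvfm favorite) k 1 j) := by
        unfold pvCB
        rw [Finset.range_add_one, Finset.filter_insert, if_pos (by rw [honck'])]
        rw [Finset.sup_insert]
        rw [max_left_comm]
        rw [max_comm]
      rw [hcb]
      push_cast
      rfl

-- A's initial indegree list counts predecessors
theorem pvIndeg0 (favorite : List Int) (hPre : Pre_calculate_mutual_chains favorite)
    (hn : 0 < favorite.length) :
    (favorite.foldl (fun acc f => pvPut acc f (pvAt acc f + 1))
        (List.replicate favorite.length (0 : Int))).length = favorite.length ∧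
    ∀ j < favorite.length,
      (favorite.foldl (fun acc f => pvPut acc f (pvAt acc f + 1))
          (List.replicate favorite.length (0 : Int))).getD j 0
        = (pvdeg favorite.length (pvfm favorite) ∅ j : Int) := by
  suffices H : ∀ m ≤ favorite.length,
      ((favorite.take m).foldl (fun acc f => pvPut acc f (pvAt acc f + 1))
        (List.replicate favorite.length (0 : Int))).length = favorite.length ∧
      ∀ j < favorite.length,
        ((favorite.take m).foldl (fun acc f => pvPut acc f (pvAt acc f + 1))
          (List.replicate favorite.length (0 : Int))).getD j 0
          = (((Finset.range m).filter (fun p => pvfm favorite p = j)).card : Int) by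
    obtain ⟨h1, h2⟩ := H favorite.length le_rfl
    rw [List.take_length] at h1 h2
    refine ⟨h1, fun j hj => ?_⟩
    rw [h2 j hj]
    congr 2
    apply Finset.filter_congr
    intro p hp
    simp
  intro m
  induction m with
  | zero =>
    intro _
    refine ⟨by simp, fun j hj => ?_⟩
    simp [List.getD, List.getElem?_replicate, hj]
  | succ m ih =>
    intro hm1
    obtain ⟨ih1, ih2⟩ := ih (by omega)
    have htake : favorite.take (m + 1) = favorite.take m ++ [favorite.getD m 0] := by
      rw [List.take_succ]
      congr 1
      rw [List.getElem?_eq_getElem (by omega), List.getD_eq_getElem favorite 0 (by omega)]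
      rfl
    rw [htake, List.foldl_append]
    simp only [List.foldl_cons, List.foldl_nil]
    have hx : PySem.Raise.InRange favorite.length (favorite.getD m 0) :=
      pvElt favorite hPre m (by omega)
    have hx' : PySem.Raise.InRange
        ((favorite.take m).foldl (fun acc f => pvPut acc f (pvAt acc f + 1))
          (List.replicate favorite.length (0 : Int))).length (favorite.getD m 0) := by
      rw [ih1]; exact hx
    have hat := pvAt_eq _ (favorite.getD m 0) hx'
    have hput := pvPut_eq ((favorite.take m).foldl (fun acc f => pvPut acc f (pvAt acc f + 1))
        (List.replicate favorite.length (0 : Int))) (favorite.getD m 0)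
        (pvAt ((favorite.take m).foldl (fun acc f => pvPut acc f (pvAt acc f + 1))
          (List.replicate favorite.length (0 : Int))) (favorite.getD m 0) + 1) hx'
    rw [hput, hat, ih1]
    have hidx : pvIdx favorite.length (favorite.getD m 0) = pvfm favorite m := rfl
    rw [hidx]
    constructor
    · simpa using ih1
    · intro j hj
      rw [pvGetD_set _ _ _ _ _ (by rw [ih1]; exact hj)]
      have hcard : ((Finset.range (m + 1)).filter (fun p => pvfm favorite p = j)).card
          = ((Finset.range m).filter (fun p => pvfm favorite p = j)).card
            + (if pvfm favorite m = j then 1 else 0) := by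
        rw [Finset.range_add_one, Finset.filter_insert]
        by_cases he : pvfm favorite m = j
        · rw [if_pos he, if_pos he, Finset.card_insert_of_notMem (by
            rw [Finset.mem_filter]
            rintro ⟨hmem, _⟩
            rw [Finset.mem_range] at hmem
            omega)]
        · rw [if_neg he, if_neg he, Nat.add_zero]
      rw [hcard]
      by_cases he : pvfm favorite m = j
      · rw [if_pos he, if_pos he, he, ih2 j hj]
        push_cast
        ring
      · rw [if_neg he, if_neg he, ih2 j hj]
        push_cast
        ring

-- A's worklist loop: Kahn-style peeling reaches the closed form
theorem pvALoop_spec (favorite : List Int) (hPre : Pre_calculate_mutual_chains favorite)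
    (hn : 0 < favorite.length) :
    ∀ (fuel : Nat) (queue indeg chain : List Int) (P : Finset Nat),
      (∀ q ∈ queue, PySem.Raise.InRange favorite.length q) →
      (queue.map (pvIdx favorite.length)).Nodup →
      (∀ j < favorite.length, (j ∈ queue.map (pvIdx favorite.length) ↔
          (j ∉ P ∧ pvdeg favorite.length (pvfm favorite) P j = 0))) →
      (∀ p ∈ P, p < favorite.length ∧ pvOnC favorite.length (pvfm favorite) p = false) →
      (∀ p ∈ P, pvdeg favorite.length (pvfm favorite) P p = 0) →
      indeg.length = favorite.length →
      (∀ j < favorite.length, indeg.getD j 0 = (pvdeg favorite.length (pvfm favorite) P j : Int)) →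
      chain.length = favorite.length →
      (∀ j < favorite.length, chain.getD j 0 = (pvK favorite.length (pvfm favorite) P j : Int)) →
      favorite.length + 1 ≤ fuel + P.card →
      ∀ j < favorite.length,
        (pvALoop favorite fuel queue indeg chain).getD j 0
          = (pvC favorite.length (pvfm favorite) j : Int) := by
  have hf : ∀ i, pvfm favorite i < favorite.length := pvfm_lt favorite hn
  intro fuel
  induction fuel with
  | zero =>
    intro queue indeg chain P hq1 hq2 hq3 hP1 hP2 hil hiv hcl hcv hfuel
    exfalso
    have hsub : P ⊆ Finset.range favorite.length :=
      fun p hp => Finset.mem_range.mpr (hP1 p hp).1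
    have := Finset.card_le_card hsub
    rw [Finset.card_range] at this
    omega
  | succ fuel ih =>
    intro queue indeg chain P hq1 hq2 hq3 hP1 hP2 hil hiv hcl hcv hfuel
    cases queue with
    | nil =>
      intro j hj
      rw [pvALoop, hcv j hj]
      congr 1
      have hcompl := pvComplete favorite.length (pvfm favorite) hf P
        (fun p hp => (hP1 p hp).2)
        (fun j' hj' hcon => by
          have := (hq3 j' hj').mpr hcon
          simp at this)
      rw [pvC_rec favorite.length (pvfm favorite) hf j]
      unfold pvK
      congr 2
      apply Finset.filter_congr
      intro p hp
      rw [Finset.mem_range] at hp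
      constructor
      · rintro ⟨h1, h2⟩; exact ⟨h1, (hP1 p h2).2⟩
      · rintro ⟨h1, h2⟩; exact ⟨h1, hcompl p hp h2⟩
    | cons current rest =>
      have hcin : PySem.Raise.InRange favorite.length current :=
        hq1 current List.mem_cons_self
      have hcn : pvIdx favorite.length current < favorite.length := pvIdx_lt _ _ hn
      have hchead : pvIdx favorite.length current
          ∈ (current :: rest).map (pvIdx favorite.length) := by simp
      obtain ⟨hcP, hcdeg⟩ := (hq3 _ hcn).mp hchead
      have hPnc : ∀ p ∈ P, pvOnC favorite.length (pvfm favorite) p = false :=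
        fun p hp => (hP1 p hp).2
      have hcnc : pvOnC favorite.length (pvfm favorite) (pvIdx favorite.length current) = false :=
        pvQueue_nc _ _ hf P hPnc _ hcn hcdeg
      have hKc : pvK favorite.length (pvfm favorite) P (pvIdx favorite.length current)
          = pvC favorite.length (pvfm favorite) (pvIdx favorite.length current) :=
        pvK_eq_pvC _ _ hf P hPnc _ hcdeg
      obtain ⟨hnext_eq, hnext_in, hnext_idx⟩ := pvAt_fm favorite hPre hn current hcin
      have hfcn : pvfm favorite (pvIdx favorite.length current) < favorite.length := hf _
      have hfcne : pvfm favorite (pvIdx favorite.length current) ≠ pvIdx favorite.length current := by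
        intro hcon
        have hper : pvPer (pvfm favorite) (pvIdx favorite.length current) :=
          ⟨1, by omega, by rw [Function.iterate_one]; exact hcon⟩
        have : pvOnC favorite.length (pvfm favorite) (pvIdx favorite.length current) = true := by
          rw [pvOnC_iff_per _ _ hf]; exact ⟨hcn, hper⟩
        rw [hcnc] at this; exact Bool.false_ne_true this
      have hdegfc : 1 ≤ pvdeg favorite.length (pvfm favorite) P
          (pvfm favorite (pvIdx favorite.length current)) :=
        pvdeg_pos favorite.length (pvfm favorite) P _ hcn hcP
      have hfcP : pvfm favorite (pvIdx favorite.length current) ∉ P := by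
        intro hcon
        have := hP2 _ hcon
        omega
      -- rewrite the loop body
      have hchain_at_next : pvAt chain (pvAt favorite current)
          = (pvK favorite.length (pvfm favorite) P (pvfm favorite (pvIdx favorite.length current)) : Int) := by
        rw [pvAt_eq chain _ (by rw [hcl]; exact hnext_in), hcl, hnext_idx]
        exact hcv _ hfcn
      have hchain_at_cur : pvAt chain current
          = (pvC favorite.length (pvfm favorite) (pvIdx favorite.length current) : Int) := by
        rw [pvAt_eq chain _ (by rw [hcl]; exact hcin), hcl, hcv _ hcn, hKc]
      have hindeg_at_next : pvAt indeg (pvAt favorite current)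
          = (pvdeg favorite.length (pvfm favorite) P (pvfm favorite (pvIdx favorite.length current)) : Int) := by
        rw [pvAt_eq indeg _ (by rw [hil]; exact hnext_in), hil, hnext_idx]
        exact hiv _ hfcn
      have hchain' : pvPut chain (pvAt favorite current)
            (max (pvAt chain (pvAt favorite current)) (pvAt chain current + 1))
          = chain.set (pvfm favorite (pvIdx favorite.length current))
              (max ((pvK favorite.length (pvfm favorite) P (pvfm favorite (pvIdx favorite.length current)) : Int))
                ((pvC favorite.length (pvfm favorite) (pvIdx favorite.length current) : Int) + 1)) := by
        rw [pvPut_eq chain _ _ (by rw [hcl]; exact hnext_in), hcl, hnext_idx,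
          hchain_at_next, hchain_at_cur]
      have hindeg' : pvPut indeg (pvAt favorite current) (pvAt indeg (pvAt favorite current) - 1)
          = indeg.set (pvfm favorite (pvIdx favorite.length current))
              ((pvdeg favorite.length (pvfm favorite) P (pvfm favorite (pvIdx favorite.length current)) : Int) - 1) := by
        rw [pvPut_eq indeg _ _ (by rw [hil]; exact hnext_in), hil, hnext_idx, hindeg_at_next]
      have hcond_eval : pvAt
            (indeg.set (pvfm favorite (pvIdx favorite.length current))
              ((pvdeg favorite.length (pvfm favorite) P (pvfm favorite (pvIdx favorite.length current)) : Int) - 1))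
            (pvAt favorite current)
          = (pvdeg favorite.length (pvfm favorite) P (pvfm favorite (pvIdx favorite.length current)) : Int) - 1 := by
        rw [pvAt_eq _ _ (by rw [List.length_set, hil]; exact hnext_in)]
        rw [List.length_set, hil, hnext_idx]
        rw [pvGetD_set _ _ _ _ _ (by rw [hil]; exact hfcn), if_pos rfl]
      -- invariants for the extended processed set
      have hcardP' : (insert (pvIdx favorite.length current) P).card = P.card + 1 :=
        Finset.card_insert_of_notMem hcP
      have hP1' : ∀ p ∈ insert (pvIdx favorite.length current) P,
          p < favorite.length ∧ pvOnC favorite.length (pvfm favorite) p = false := by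
        intro p hp
        rcases Finset.mem_insert.mp hp with h | h
        · rw [h]; exact ⟨hcn, hcnc⟩
        · exact hP1 p h
      have hP2' : ∀ p ∈ insert (pvIdx favorite.length current) P,
          pvdeg favorite.length (pvfm favorite) (insert (pvIdx favorite.length current) P) p = 0 := by
        intro p hp
        have hmono := pvdeg_mono favorite.length (pvfm favorite) P (pvIdx favorite.length current) p
        rcases Finset.mem_insert.mp hp with h | h
        · rw [h]; rw [h] at hmono; omega
        · have := hP2 p h; omega
      have hiv' : ∀ j < favorite.length,
          (indeg.set (pvfm favorite (pvIdx favorite.length current))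
            ((pvdeg favorite.length (pvfm favorite) P (pvfm favorite (pvIdx favorite.length current)) : Int) - 1)).getD j 0
          = (pvdeg favorite.length (pvfm favorite) (insert (pvIdx favorite.length current) P) j : Int) := by
        intro j hj
        rw [pvGetD_set _ _ _ _ _ (by rw [hil]; exact hj)]
        rw [pvdeg_insert _ _ P _ j hcn hcP]
        by_cases he : pvfm favorite (pvIdx favorite.length current) = j
        · rw [if_pos he, if_pos he, ← he]
          push_cast [Nat.cast_sub hdegfc]
          ring
        · rw [if_neg he, if_neg he, hiv j hj]
      have hcv' : ∀ j < favorite.length,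
          (chain.set (pvfm favorite (pvIdx favorite.length current))
            (max ((pvK favorite.length (pvfm favorite) P (pvfm favorite (pvIdx favorite.length current)) : Int))
              ((pvC favorite.length (pvfm favorite) (pvIdx favorite.length current) : Int) + 1))).getD j 0
          = (pvK favorite.length (pvfm favorite) (insert (pvIdx favorite.length current) P) j : Int) := by
        intro j hj
        rw [pvGetD_set _ _ _ _ _ (by rw [hcl]; exact hj)]
        rw [pvK_insert _ _ P _ j hcn hcP]
        by_cases he : pvfm favorite (pvIdx favorite.length current) = j
        · rw [if_pos he, if_pos he, ← he]
          push_cast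
          ring_nf
        · rw [if_neg he, if_neg he, hcv j hj]
      have hrest_mem : ∀ j, j ∈ rest.map (pvIdx favorite.length) →
          j ∉ P ∧ pvdeg favorite.length (pvfm favorite) P j = 0
            ∧ j ≠ pvIdx favorite.length current ∧ j < favorite.length := by
        intro j hjr
        have hjn : j < favorite.length := by
          rw [List.mem_map] at hjr
          obtain ⟨q, _, rfl⟩ := hjr
          exact pvIdx_lt _ _ hn
        have hjcons : j ∈ (current :: rest).map (pvIdx favorite.length) := by
          rw [List.map_cons]; exact List.mem_cons_of_mem _ hjr
        obtain ⟨h1, h2⟩ := (hq3 j hjn).mp hjcons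
        refine ⟨h1, h2, ?_, hjn⟩
        intro hcon
        rw [List.map_cons] at hq2
        rw [List.nodup_cons] at hq2
        rw [hcon] at hjr
        exact hq2.1 hjr
      have hnotinP' : ∀ j, j ∉ P → j ≠ pvIdx favorite.length current →
          j ∉ insert (pvIdx favorite.length current) P := by
        intro j h1 h2 hcon
        rcases Finset.mem_insert.mp hcon with h | h
        · exact h2 h
        · exact h1 h
      have hdeg0' : ∀ j, pvdeg favorite.length (pvfm favorite) P j = 0 →
          pvdeg favorite.length (pvfm favorite) (insert (pvIdx favorite.length current) P) j = 0 := by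
        intro j h
        have := pvdeg_mono favorite.length (pvfm favorite) P (pvIdx favorite.length current) j
        omega
      have hdegP'fc : pvdeg favorite.length (pvfm favorite)
            (insert (pvIdx favorite.length current) P) (pvfm favorite (pvIdx favorite.length current))
          = pvdeg favorite.length (pvfm favorite) P (pvfm favorite (pvIdx favorite.length current)) - 1 := by
        rw [pvdeg_insert _ _ P _ _ hcn hcP, if_pos rfl]
      rw [pvALoop, hchain', hindeg', hcond_eval]
      by_cases hz : (pvdeg favorite.length (pvfm favorite) P (pvfm favorite (pvIdx favorite.length current)) : Int) - 1 = 0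
      · rw [if_pos hz]
        have hdegz : pvdeg favorite.length (pvfm favorite)
            (insert (pvIdx favorite.length current) P) (pvfm favorite (pvIdx favorite.length current)) = 0 := by
          rw [hdegP'fc]; omega
        apply ih (pvAt favorite current :: rest) _ _ (insert (pvIdx favorite.length current) P)
        · intro q hq
          rcases List.mem_cons.mp hq with h | h
          · rw [h]; exact hnext_in
          · exact hq1 q (List.mem_cons_of_mem _ h)
        · rw [List.map_cons, hnext_idx, List.nodup_cons]
          constructor
          · intro hcon
            obtain ⟨_, h2, _, _⟩ := hrest_mem _ hcon
            omega
          · rw [List.map_cons, List.nodup_cons] at hq2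
            exact hq2.2
        · intro j hj
          rw [List.map_cons, hnext_idx]
          constructor
          · intro hmem
            rcases List.mem_cons.mp hmem with h | h
            · rw [h]
              exact ⟨hnotinP' _ hfcP hfcne, by rw [← h] at hdegz ⊢; exact hdegz⟩
            · obtain ⟨h1, h2, h3, _⟩ := hrest_mem j h
              exact ⟨hnotinP' j h1 h3, hdeg0' j h2⟩
          · rintro ⟨h1, h2⟩
            by_cases he : j = pvfm favorite (pvIdx favorite.length current)
            · rw [he]; exact List.mem_cons_self
            · have hdegPj : pvdeg favorite.length (pvfm favorite) P j = 0 := by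
                rw [pvdeg_insert _ _ P _ j hcn hcP] at h2
                rw [if_neg (fun hcon => he hcon.symm)] at h2
                exact h2
              have hjP : j ∉ P := fun hcon => h1 (Finset.mem_insert_of_mem hcon)
              have hjcons := (hq3 j hj).mpr ⟨hjP, hdegPj⟩
              rw [List.map_cons] at hjcons
              rcases List.mem_cons.mp hjcons with h | h
              · exfalso; exact h1 (by rw [h]; exact Finset.mem_insert_self _ _)
              · exact List.mem_cons_of_mem _ h
        · exact hP1'
        · exact hP2'
        · rw [List.length_set]; exact hil
        · exact hiv'
        · rw [List.length_set]; exact hcl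
        · exact hcv'
        · omega
      · rw [if_neg hz]
        have hdegnz : pvdeg favorite.length (pvfm favorite)
            (insert (pvIdx favorite.length current) P) (pvfm favorite (pvIdx favorite.length current)) ≠ 0 := by
          rw [hdegP'fc]
          intro hcon
          apply hz
          have : (1 : Nat) ≤ pvdeg favorite.length (pvfm favorite) P (pvfm favorite (pvIdx favorite.length current)) := hdegfc
          omega
        apply ih rest _ _ (insert (pvIdx favorite.length current) P)
        · intro q hq
          exact hq1 q (List.mem_cons_of_mem _ hq)
        · rw [List.map_cons, List.nodup_cons] at hq2
          exact hq2.2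
        · intro j hj
          constructor
          · intro hmem
            obtain ⟨h1, h2, h3, _⟩ := hrest_mem j hmem
            exact ⟨hnotinP' j h1 h3, hdeg0' j h2⟩
          · rintro ⟨h1, h2⟩
            have he : j ≠ pvfm favorite (pvIdx favorite.length current) := by
              intro hcon
              rw [hcon] at h2
              exact hdegnz h2
            have hdegPj : pvdeg favorite.length (pvfm favorite) P j = 0 := by
              rw [pvdeg_insert _ _ P _ j hcn hcP] at h2
              rw [if_neg (fun hcon => he hcon.symm)] at h2
              exact h2
            have hjP : j ∉ P := fun hcon => h1 (Finset.mem_insert_of_mem hcon)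
            have hjcons := (hq3 j hj).mpr ⟨hjP, hdegPj⟩
            rw [List.map_cons] at hjcons
            rcases List.mem_cons.mp hjcons with h | h
            · exfalso; exact h1 (by rw [h]; exact Finset.mem_insert_self _ _)
            · exact h
        · exact hP1'
        · exact hP2'
        · rw [List.length_set]; exact hil
        · exact hiv'
        · rw [List.length_set]; exact hcl
        · exact hcv'
        · omega

-- the two final sums agree when the chain lists agree on [0, n)
theorem pvSum_congr (favorite c1 c2 : List Int) (n : Nat)
    (hl1 : c1.length = n) (hl2 : c2.length = n) (hn : n = favorite.length)
    (h : ∀ i < n, c1.getD i 0 = c2.getD i 0) :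
    ∀ k ≤ n, ∀ (a : Int),
      (List.range k).foldl (fun acc i =>
        if (Int.ofNat i) = pvAt favorite (pvAt favorite (Int.ofNat i)) then acc + pvAt c1 (Int.ofNat i)
        else acc) a
      = (List.range k).foldl (fun acc i =>
        if (Int.ofNat i) = pvAt favorite (pvAt favorite (Int.ofNat i)) then acc + pvAt c2 (Int.ofNat i)
        else acc) a := by
  intro k
  induction k with
  | zero => intro _ a; rfl
  | succ k ih =>
    intro hk a
    rw [List.range_succ, List.foldl_append, List.foldl_append]
    simp only [List.foldl_cons, List.foldl_nil]
    rw [ih (by omega) a]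
    by_cases hc : (Int.ofNat k) = pvAt favorite (pvAt favorite (Int.ofNat k))
    · rw [if_pos hc, if_pos hc]
      congr 1
      have hin1 : PySem.Raise.InRange c1.length (Int.ofNat k) := by
        rw [hl1]; constructor <;> simp <;> omega
      have hin2 : PySem.Raise.InRange c2.length (Int.ofNat k) := by
        rw [hl2]; constructor <;> simp <;> omega
      rw [pvAt_eq c1 _ hin1, pvAt_eq c2 _ hin2, hl1, hl2, pvIdx_ofNat _ _ (by omega)]
      exact h k (by omega)
    · rw [if_neg hc, if_neg hc]

theorem pvBWalk_len (favorite : List Int) (onCL : List Bool) :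
    ∀ (fuel : Nat) (j d : Int) (chain : List Int),
      (pvBWalk favorite onCL fuel j d chain).length = chain.length := by
  intro fuel
  induction fuel with
  | zero => intro j d chain; rfl
  | succ fuel ih =>
    intro j d chain
    rw [pvBWalk]
    have hlen : (if pvAt chain j < d then pvPut chain j d else chain).length = chain.length := by
      by_cases hlt : pvAt chain j < d
      · rw [if_pos hlt]; unfold pvPut; rw [PySem.List.length_pySetD]
      · rw [if_neg hlt]
    by_cases hc : PySem.List.pyGetD onCL j false = true
    · rw [if_pos hc]; exact hlen
    · rw [if_neg hc, ih, hlen]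

theorem pvALoop_len (favorite : List Int) :
    ∀ (fuel : Nat) (queue indeg chain : List Int),
      (pvALoop favorite fuel queue indeg chain).length = chain.length := by
  intro fuel
  induction fuel with
  | zero => intro q i c; rfl
  | succ fuel ih =>
    intro q i c
    cases q with
    | nil => rfl
    | cons cur rest =>
      rw [pvALoop]
      have hlen : (pvPut c (pvAt favorite cur)
          (max (pvAt c (pvAt favorite cur)) (pvAt c cur + 1))).length = c.length := by
        unfold pvPut; rw [PySem.List.length_pySetD]
      by_cases hc : pvAt (pvPut i (pvAt favorite cur) (pvAt i (pvAt favorite cur) - 1))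
          (pvAt favorite cur) = 0
      · rw [if_pos hc, ih, hlen]
      · rw [if_neg hc, ih, hlen]

theorem pvChainB_len (favorite : List Int) (onCL : List Bool) :
    ∀ k : Nat,
      ((List.range k).foldl (fun ch s =>
          if PySem.List.pyGetD onCL (Int.ofNat s) false then ch
          else pvBWalk favorite onCL (favorite.length + 1) (pvAt favorite (Int.ofNat s)) 2 ch)
        (List.replicate favorite.length (1 : Int))).length = favorite.length := by
  intro k
  induction k with
  | zero => simp
  | succ k ih =>
    rw [List.range_succ, List.foldl_append]
    simp only [List.foldl_cons, List.foldl_nil]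
    by_cases hc : PySem.List.pyGetD onCL (Int.ofNat k) false = true
    · rw [if_pos hc]; exact ih
    · rw [if_neg hc, pvBWalk_len, ih]

-- ===== VERDICT (by name: the statement is the Claim_ definition above) =====
theorem calculate_mutual_chains_spec : Claim_equal_calculate_mutual_chains := by
  intro favorite hDom hPre
  unfold Spec_calculate_mutual_chains
  by_cases hn0 : favorite.length = 0
  · have he : favorite = [] := List.eq_nil_of_length_eq_zero hn0
    subst he
    rfl
  · have hn : 0 < favorite.length := Nat.pos_of_ne_zero hn0
    have hf : ∀ i, pvfm favorite i < favorite.length := pvfm_lt favorite hn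
    -- B's side: on_cycle list facts and chain values
    obtain ⟨honl, honc⟩ := pvOnCList favorite hPre hn
    have hB := pvChainB favorite hPre hn _ honl honc
    have hBlen := pvChainB_len favorite
      ((List.range favorite.length).foldl (fun acc s =>
        PySem.List.pySetD acc
          ((List.range favorite.length).foldl (fun j _ => pvAt favorite j) (Int.ofNat s)) true)
        (List.replicate favorite.length false)) favorite.length
    -- A's side: initial state invariants, then the loop lemma
    obtain ⟨hil, hiv⟩ := pvIndeg0 favorite hPre hn
    have hq0 : ∀ j : Nat, j < favorite.length →
        ((((List.range favorite.length).filter (fun i => pvAt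
            (favorite.foldl (fun acc f => pvPut acc f (pvAt acc f + 1))
              (List.replicate favorite.length (0 : Int))) (Int.ofNat i) = 0)).map Int.ofNat).reverse.map
          (pvIdx favorite.length) = ((List.range favorite.length).filter (fun i => pvAt
            (favorite.foldl (fun acc f => pvPut acc f (pvAt acc f + 1))
              (List.replicate favorite.length (0 : Int))) (Int.ofNat i) = 0)).reverse) := by
      intro j hj
      rw [List.map_reverse]
      congr 1
      rw [List.map_map]
      have hstep : ∀ l : List Nat, (∀ i ∈ l, i < favorite.length) →
          List.map (pvIdx favorite.length ∘ Int.ofNat) l = l := by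
        intro l hl
        conv_rhs => rw [← List.map_id l]
        apply List.map_congr_left
        intro i hi
        exact pvIdx_ofNat _ _ (hl i hi)
      apply hstep
      intro i hi
      rw [List.mem_filter, List.mem_range] at hi
      exact hi.1
    have hqmap := hq0 0 hn
    have hatq : ∀ j : Nat, j < favorite.length →
        (pvAt (favorite.foldl (fun acc f => pvPut acc f (pvAt acc f + 1))
            (List.replicate favorite.length (0 : Int))) (Int.ofNat j)
          = (pvdeg favorite.length (pvfm favorite) ∅ j : Int)) := by
      intro j hj
      have hin : PySem.Raise.InRange (favorite.foldl (fun acc f => pvPut acc f (pvAt acc f + 1))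
          (List.replicate favorite.length (0 : Int))).length (Int.ofNat j) := by
        rw [hil]; constructor <;> simp <;> omega
      rw [pvAt_eq _ _ hin, hil, pvIdx_ofNat _ _ hj]
      exact hiv j hj
    have hA := pvALoop_spec favorite hPre hn (favorite.length + 1)
      ((((List.range favorite.length).filter (fun i => pvAt
          (favorite.foldl (fun acc f => pvPut acc f (pvAt acc f + 1))
            (List.replicate favorite.length (0 : Int))) (Int.ofNat i) = 0)).map Int.ofNat).reverse)
      (favorite.foldl (fun acc f => pvPut acc f (pvAt acc f + 1))
        (List.replicate favorite.length (0 : Int)))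
      (List.replicate favorite.length (1 : Int)) ∅
      (by
        intro q hq
        rw [List.mem_reverse, List.mem_map] at hq
        obtain ⟨i, hi, rfl⟩ := hq
        rw [List.mem_filter, List.mem_range] at hi
        constructor <;> simp <;> omega)
      (by
        rw [hqmap, List.nodup_reverse]
        exact List.Nodup.filter _ List.nodup_range)
      (by
        intro j hj
        rw [hqmap, List.mem_reverse]
        simp only [List.mem_filter, List.mem_range, decide_eq_true_eq]
        constructor
        · rintro ⟨h1, h2⟩
          rw [hatq j hj] at h2
          refine ⟨Finset.notMem_empty j, ?_⟩
          exact_mod_cast h2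
        · rintro ⟨h1, h2⟩
          refine ⟨hj, ?_⟩
          rw [hatq j hj, h2]
          simp)
      (by intro p hp; exact absurd hp (Finset.notMem_empty p))
      (by intro p hp; exact absurd hp (Finset.notMem_empty p))
      hil hiv
      (by simp)
      (by
        intro j hj
        have h1 : (List.replicate favorite.length (1 : Int)).getD j 0 = 1 := by
          rw [List.getD_eq_getElem _ _ (by simpa using hj)]
          simp
        rw [h1]
        have h2 : pvK favorite.length (pvfm favorite) ∅ j = 1 := by
          unfold pvK
          have : (Finset.range favorite.length).filter
              (fun p => pvfm favorite p = j ∧ p ∈ (∅ : Finset Nat)) = ∅ := by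
            apply Finset.filter_false_of_mem
            intro p hp
            rintro ⟨_, hcon⟩
            exact absurd hcon (Finset.notMem_empty p)
          rw [this]
          simp
        rw [h2]
        simp)
      (by simp)
    have hAlen := pvALoop_len favorite (favorite.length + 1)
      ((((List.range favorite.length).filter (fun i => pvAt
          (favorite.foldl (fun acc f => pvPut acc f (pvAt acc f + 1))
            (List.replicate favorite.length (0 : Int))) (Int.ofNat i) = 0)).map Int.ofNat).reverse)
      (favorite.foldl (fun acc f => pvPut acc f (pvAt acc f + 1))
        (List.replicate favorite.length (0 : Int)))
      (List.replicate favorite.length (1 : Int))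
    rw [List.length_replicate] at hAlen
    show calculate_mutual_chains favorite = calculate_mutual_chains_alt favorite
    unfold calculate_mutual_chains calculate_mutual_chains_alt
    apply pvSum_congr favorite _ _ favorite.length hAlen hBlen rfl
      (fun i hi => by rw [hA i hi, hB i hi]) favorite.length le_rfl 0
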